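-- pv_equiv track=rewrite | github.com/marchiesa/proof-lifting | dataset/0229_1541_A/solution.py | solve
-- ===== SOURCE A (Python) =====
-- def solve(n):
--     if not n:
--         return []
--
--     if n == 2:
--         return [2, 1]
--
--     if n == 3:
--         return [3, 1, 2]
--
--     return solve(n - 2) + [n, n - 1]
-- ===== SOURCE B (Python) =====
-- def solve(n):
--     if n == 0:
--         return []
--     res = [2, 1] if n % 2 == 0 else [3, 1, 2]
--     for k in range(len(res) + 2, n + 1, 2):
--         res += [k, k - 1]
--     return res
-- ===== Notes on version B (the rewrite author's own statement) =====
-- stated objective: faster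
-- what changed: replaces A's recursion n -> n-2 with list concatenation at every level by a single iterative pass that extends one list with the pairs [k, k-1] for k in range(start, n+1, 2)
-- outside the precondition, e.g. on solve(1): A raises RecursionError, B returns [3, 1, 2]
import Mathlib
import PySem

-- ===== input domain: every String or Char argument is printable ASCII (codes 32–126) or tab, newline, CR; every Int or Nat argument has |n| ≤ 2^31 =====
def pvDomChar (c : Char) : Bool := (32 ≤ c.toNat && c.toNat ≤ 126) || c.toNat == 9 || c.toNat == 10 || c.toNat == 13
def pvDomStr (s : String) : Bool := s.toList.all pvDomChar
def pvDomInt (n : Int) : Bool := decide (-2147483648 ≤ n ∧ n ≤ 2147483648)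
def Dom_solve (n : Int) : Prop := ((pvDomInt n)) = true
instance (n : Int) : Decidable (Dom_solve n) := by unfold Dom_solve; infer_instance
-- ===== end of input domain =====

-- B replaces A's O(n^2) recursion-with-concatenation by a single iterative pass that
-- extends one list with the pairs [k, k-1]; objective: faster (asymptotic).

-- ===== PORT A =====
-- A's recursion n ↦ n-2 terminates only on the inputs Pre_solve admits; the port carries
-- fuel n.toNat (more than the recursion depth (n-2)/2 on every admitted input); out of
-- fuel it returns [] — reachable only outside Pre_solve, where A raises RecursionError.
def solveFuel : Nat → Int → List Int
  | 0, _ => []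
  | f + 1, n =>
      if n = 0 then []
      else if n = 2 then [2, 1]
      else if n = 3 then [3, 1, 2]
      else solveFuel f (n - 2) ++ [n, n - 1]

def solve (n : Int) : List Int := solveFuel n.toNat n

-- ===== PORT B =====
def solve_alt (n : Int) : List Int :=
  if n = 0 then []
  else
    let res : List Int := if PySem.Int.mod n 2 = 0 then [2, 1] else [3, 1, 2]
    (PySem.List.pyRange ((res.length : Int) + 2) (n + 1) 2).foldl
      (fun acc k => acc ++ [k, k - 1]) res

-- ===== PRECONDITION & SPEC =====
-- Pre_ excludes exactly the inputs (n = 1 and n < 0) on which A's recursion never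
-- reaches a base case and raises RecursionError.
def Pre_solve (n : Int) : Prop := n = 0 ∨ 2 ≤ n
instance (n : Int) : Decidable (Pre_solve n) := by unfold Pre_solve; infer_instance
def pvWitness_solve : Int := (6)

def Spec_solve (n : Int) (out : List Int) : Prop := out = solve_alt n
instance (n : Int) (out : List Int) : Decidable (Spec_solve n out) := by unfold Spec_solve; infer_instance

-- ===== CLAIM (what is proved, stated in full; the proofs are below) =====
def Claim_equal_solve : Prop := ∀ (n : Int), Dom_solve n → Pre_solve n → Spec_solve n (solve n)

-- ===== LEMMAS AND PROOFS =====

-- a step-2 range ending exactly at n gains n when the stop bound moves from n-1 to n+1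
theorem pyRange_two_snoc (s n : Int) (hs : s ≤ n) (hd : 2 ∣ n - s) :
    PySem.List.pyRange s (n + 1) 2 = PySem.List.pyRange s (n - 1) 2 ++ [n] := by
  obtain ⟨t, ht⟩ := hd
  have ht0 : 0 ≤ t := by omega
  rw [PySem.List.pyRange_of_pos _ _ (by norm_num), PySem.List.pyRange_of_pos _ _ (by norm_num)]
  have h1 : (if s < n + 1 then ((n + 1 - s + 2 - 1) / 2).toNat else 0) = t.toNat + 1 := by
    rw [if_pos (by omega)]; omega
  have h2 : (if s < n - 1 then ((n - 1 - s + 2 - 1) / 2).toNat else 0) = t.toNat := by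
    by_cases h : s < n - 1
    · rw [if_pos h]; omega
    · rw [if_neg h]; omega
  rw [h1, h2, List.range_succ, List.map_append]
  simp
  omega

theorem solve_alt_step (n : Int) (h4 : 4 ≤ n) :
    solve_alt n = solve_alt (n - 2) ++ [n, n - 1] := by
  unfold solve_alt
  rw [if_neg (by omega : ¬ n = 0), if_neg (by omega : ¬ n - 2 = 0)]
  have hmod : PySem.Int.mod (n - 2) 2 = PySem.Int.mod n 2 := by
    simp [PySem.Int.mod, Int.fmod_eq_emod]
  rw [hmod]
  by_cases h : PySem.Int.mod n 2 = 0
  · have he : (2:Int) ∣ n := by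
      simp [PySem.Int.mod, Int.fmod_eq_emod] at h; omega
    rw [if_pos h]
    simp only [List.length_cons, List.length_nil]
    norm_num
    have hr := pyRange_two_snoc 4 n (by omega) (by omega)
    rw [(by ring : n - 2 + 1 = n - 1), hr]
    simp
  · have ho : ¬ (2:Int) ∣ n := by
      simp [PySem.Int.mod, Int.fmod_eq_emod] at h
      omega
    rw [if_neg h]
    simp only [List.length_cons, List.length_nil]
    norm_num
    have hr := pyRange_two_snoc 5 n (by omega) (by omega)
    rw [(by ring : n - 2 + 1 = n - 1), hr]
    simp

theorem solveFuel_eq_alt : ∀ (f : Nat) (n : Int), 2 ≤ n → n ≤ (f : Int) →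
    solveFuel f n = solve_alt n := by
  intro f
  induction f with
  | zero => intro n h1 h2; omega
  | succ f ih =>
      intro n h1 h2
      show (if n = 0 then [] else if n = 2 then [2, 1] else if n = 3 then [3, 1, 2]
            else solveFuel f (n - 2) ++ [n, n - 1]) = solve_alt n
      rw [if_neg (by omega : ¬ n = 0)]
      by_cases h2' : n = 2
      · subst h2'; norm_num; decide
      · rw [if_neg h2']
        by_cases h3 : n = 3
        · subst h3; norm_num; decide
        · rw [if_neg h3]
          have h4 : 4 ≤ n := by omega
          rw [ih (n - 2) (by omega) (by omega), ← solve_alt_step n h4]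

-- ===== VERDICT (by name: the statement is the Claim_ definition above) =====
theorem solve_spec : Claim_equal_solve := by
  intro n _ hpre
  unfold Spec_solve
  rcases hpre with h0 | h2
  · subst h0; decide
  · show solveFuel n.toNat n = solve_alt n
    exact solveFuel_eq_alt n.toNat n h2 (by omega)
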